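-- pv_equiv track=rewrite | github.com/facebookresearch/jps | dds/card_utils.py | get_contract_declarer
-- ===== SOURCE A (Python) =====
-- def get_contract_declarer(dealer, seq):
--     last_strain = '-'
--     last_strain_player = -1
--     first_call = [dict(), dict()]
--
--     player = dealer
--     for bid in seq:
--         if bid[0] == '(':
--             bid = bid[1:-1]
--
--         curr_first_call = first_call[player % 2]
--
--         strain = bid[1] if len(bid) > 1 else '-'
--
--         if strain in "CDHSN":
--             if strain not in curr_first_call:
--                 curr_first_call[strain] = player
--
--             last_strain = str(strain)
--             last_strain_player = player
--
--         player = (player + 1) % 4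
--
--     if last_strain == '-':
--         # No contract was made.
--         declarer = None
--     else:
--         declarer = first_call[last_strain_player % 2][last_strain]
--
--     return last_strain, declarer
-- ===== SOURCE B (Python) =====
-- def _strain(bid):
--     if bid[0] == '(':
--         bid = bid[1:-1]
--     s = bid[1] if len(bid) > 1 else '-'
--     return s if s in "CDHSN" else None
--
--
-- def get_contract_declarer(dealer, seq):
--     # pass 1: find the strain and player of the last contract bid
--     last_strain, last_player = '-', -1
--     player = dealer
--     for bid in seq:
--         s = _strain(bid)
--         if s is not None:
--             last_strain, last_player = s, player
--         player = (player + 1) % 4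
--     if last_strain == '-':
--         return '-', None
--     side = last_player % 2
--     # pass 2: declarer = first player on the winning side who bid that strain
--     player = dealer
--     for bid in seq:
--         if player % 2 == side and _strain(bid) == last_strain:
--             return last_strain, player
--         player = (player + 1) % 4
--     return last_strain, None  # unreachable: the last contract bid matches
-- ===== Notes on version B (the rewrite author's own statement) =====
-- stated objective: alternative
-- what changed: B drops A's per-side first-call dictionaries: a first pass finds the last strain and its bidder, then a second side-and-strain-filtered scan returns the first matching player as declarer.
import Mathlib
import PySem

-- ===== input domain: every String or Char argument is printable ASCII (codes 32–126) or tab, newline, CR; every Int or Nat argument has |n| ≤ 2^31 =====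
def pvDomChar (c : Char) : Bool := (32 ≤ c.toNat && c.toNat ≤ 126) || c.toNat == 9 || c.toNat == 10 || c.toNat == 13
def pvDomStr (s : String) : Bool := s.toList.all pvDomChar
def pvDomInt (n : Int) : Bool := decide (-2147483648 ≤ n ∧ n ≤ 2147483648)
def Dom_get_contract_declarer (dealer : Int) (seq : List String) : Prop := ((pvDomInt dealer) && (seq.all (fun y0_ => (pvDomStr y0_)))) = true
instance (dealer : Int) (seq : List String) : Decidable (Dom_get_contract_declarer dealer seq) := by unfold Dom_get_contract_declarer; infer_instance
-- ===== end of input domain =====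

-- B replaces A's per-side first-call dictionaries with a second side/strain-filtered scan (objective: alternative, same cost).
-- ===== PORT A =====
-- bid with parentheses stripped ('if bid[0] == '(': bid = bid[1:-1]')
def pvStrip (bid : String) : String :=
  if PySem.Str.pyGet? bid 0 = some '(' then PySem.Str.slice bid (some 1) (some (-1)) else bid

-- strain = bid[1] if len(bid) > 1 else '-'   (the char; '-' default never used inside Pre_)
def pvStrainCh (bid : String) : Char :=
  if 1 < PySem.Str.len bid then (PySem.Str.pyGet? bid 1).getD '-' else '-'

-- A's loop: state (last_strain, last_strain_player, first_call[0], first_call[1], player)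
def pvLoopA (seq : List String) (ls : Char) (lp : Int)
    (fc0 fc1 : PySem.Dict Char Int) (player : Int) :
    Char × Int × PySem.Dict Char Int × PySem.Dict Char Int :=
  match seq with
  | [] => (ls, lp, fc0, fc1)
  | bid :: rest =>
    let strain := pvStrainCh (pvStrip bid)
    if strain ∈ ['C', 'D', 'H', 'S', 'N'] then
      if PySem.Int.mod player 2 = 0 then
        pvLoopA rest strain player
          (if fc0.contains strain then fc0 else fc0.insert strain player) fc1
          (PySem.Int.mod (player + 1) 4)
      else
        pvLoopA rest strain player fc0
          (if fc1.contains strain then fc1 else fc1.insert strain player)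
          (PySem.Int.mod (player + 1) 4)
    else pvLoopA rest ls lp fc0 fc1 (PySem.Int.mod (player + 1) 4)

def get_contract_declarer (dealer : Int) (seq : List String) : String × Option Int :=
  let r := pvLoopA seq '-' (-1) PySem.Dict.empty PySem.Dict.empty dealer
  if r.1 = '-' then (String.ofList [r.1], none)
  else (String.ofList [r.1],
    (if PySem.Int.mod r.2.1 2 = 0 then r.2.2.1 else r.2.2.2).get? r.1)

-- ===== PORT B =====
-- Source B's _strain: the contract strain of a bid, or none
def pvStrainB (bid : String) : Option Char :=
  let b := if PySem.Str.pyGet? bid 0 = some '(' then PySem.Str.slice bid (some 1) (some (-1)) else bid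
  let s := if 1 < PySem.Str.len b then (PySem.Str.pyGet? b 1).getD '-' else '-'
  if s ∈ ['C', 'D', 'H', 'S', 'N'] then some s else none

-- pass 1: last strain and the player who bid it
def pvPass1 (seq : List String) (ls : Char) (lp player : Int) : Char × Int :=
  match seq with
  | [] => (ls, lp)
  | bid :: rest =>
    match pvStrainB bid with
    | some s => pvPass1 rest s player (PySem.Int.mod (player + 1) 4)
    | none => pvPass1 rest ls lp (PySem.Int.mod (player + 1) 4)

-- pass 2: first player of the given side whose bid has the given strain
def pvPass2 (seq : List String) (player side : Int) (t : Char) : Option Int :=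
  match seq with
  | [] => none
  | bid :: rest =>
    if PySem.Int.mod player 2 = side ∧ pvStrainB bid = some t then some player
    else pvPass2 rest (PySem.Int.mod (player + 1) 4) side t

def get_contract_declarer_alt (dealer : Int) (seq : List String) : String × Option Int :=
  let p1 := pvPass1 seq '-' (-1) dealer
  if p1.1 = '-' then ("-", none)
  else (String.ofList [p1.1], pvPass2 seq dealer (PySem.Int.mod p1.2 2) p1.1)

-- ===== PRECONDITION & SPEC =====
-- Pre_ excludes sequences containing an empty bid string: there 'bid[0]' raises IndexError in A (and in B).
def Pre_get_contract_declarer (dealer : Int) (seq : List String) : Prop :=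
  ∀ bid ∈ seq, bid ≠ ""
instance (dealer : Int) (seq : List String) : Decidable (Pre_get_contract_declarer dealer seq) := by
  unfold Pre_get_contract_declarer; infer_instance

def pvWitness_get_contract_declarer : Int × List String := (0, ["p", "1C", "(2D)", "2H"])

def Spec_get_contract_declarer (dealer : Int) (seq : List String) (out : String × Option Int) : Prop := out = get_contract_declarer_alt dealer seq
instance (dealer : Int) (seq : List String) (out : String × Option Int) : Decidable (Spec_get_contract_declarer dealer seq out) := by unfold Spec_get_contract_declarer; infer_instance

-- ===== CLAIM (what is proved, stated in full; the proofs are below) =====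
def Claim_equal_get_contract_declarer : Prop := ∀ (dealer : Int) (seq : List String), Dom_get_contract_declarer dealer seq → Pre_get_contract_declarer dealer seq → Spec_get_contract_declarer dealer seq (get_contract_declarer dealer seq)

-- ===== LEMMAS AND PROOFS =====

-- Source B's _strain, phrased through A's helpers
theorem pvStrainB_pos (bid : String) (hs : pvStrainCh (pvStrip bid) ∈ ['C', 'D', 'H', 'S', 'N']) :
    pvStrainB bid = some (pvStrainCh (pvStrip bid)) := by
  have h : pvStrainB bid = if pvStrainCh (pvStrip bid) ∈ ['C', 'D', 'H', 'S', 'N']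
      then some (pvStrainCh (pvStrip bid)) else none := rfl
  rw [h, if_pos hs]

theorem pvStrainB_neg (bid : String) (hs : pvStrainCh (pvStrip bid) ∉ ['C', 'D', 'H', 'S', 'N']) :
    pvStrainB bid = none := by
  have h : pvStrainB bid = if pvStrainCh (pvStrip bid) ∈ ['C', 'D', 'H', 'S', 'N']
      then some (pvStrainCh (pvStrip bid)) else none := rfl
  rw [h, if_neg hs]

-- one unfolding step of A's loop
theorem pvLoopA_cons (bid : String) (rest : List String) (ls : Char) (lp : Int)
    (fc0 fc1 : PySem.Dict Char Int) (p : Int) :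
    pvLoopA (bid :: rest) ls lp fc0 fc1 p =
      (if pvStrainCh (pvStrip bid) ∈ ['C', 'D', 'H', 'S', 'N'] then
        if PySem.Int.mod p 2 = 0 then
          pvLoopA rest (pvStrainCh (pvStrip bid)) p
            (if fc0.contains (pvStrainCh (pvStrip bid)) then fc0
             else fc0.insert (pvStrainCh (pvStrip bid)) p) fc1 (PySem.Int.mod (p + 1) 4)
        else
          pvLoopA rest (pvStrainCh (pvStrip bid)) p fc0
            (if fc1.contains (pvStrainCh (pvStrip bid)) then fc1
             else fc1.insert (pvStrainCh (pvStrip bid)) p) (PySem.Int.mod (p + 1) 4)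
      else pvLoopA rest ls lp fc0 fc1 (PySem.Int.mod (p + 1) 4)) := rfl

-- one unfolding step of B's pass 2
theorem pvPass2_cons (bid : String) (rest : List String) (p side : Int) (c : Char) :
    pvPass2 (bid :: rest) p side c =
      (if PySem.Int.mod p 2 = side ∧ pvStrainB bid = some c then some p
       else pvPass2 rest (PySem.Int.mod (p + 1) 4) side c) := rfl

-- A's (last_strain, last_strain_player) is B's pass 1
set_option maxHeartbeats 1000000 in
theorem pvLoopA_last (seq : List String) (ls : Char) (lp : Int)
    (fc0 fc1 : PySem.Dict Char Int) (p : Int) :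
    ((pvLoopA seq ls lp fc0 fc1 p).1, (pvLoopA seq ls lp fc0 fc1 p).2.1) = pvPass1 seq ls lp p := by
  induction seq generalizing ls lp fc0 fc1 p with
  | nil => rfl
  | cons bid rest ih =>
    rw [pvLoopA_cons, show pvPass1 (bid :: rest) ls lp p = (match pvStrainB bid with
      | some s => pvPass1 rest s p (PySem.Int.mod (p + 1) 4)
      | none => pvPass1 rest ls lp (PySem.Int.mod (p + 1) 4)) from rfl]
    by_cases hs : pvStrainCh (pvStrip bid) ∈ ['C', 'D', 'H', 'S', 'N']
    · rw [if_pos hs, pvStrainB_pos bid hs]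
      by_cases hm : PySem.Int.mod p 2 = 0
      · rw [if_pos hm]; exact ih ..
      · rw [if_neg hm]; exact ih ..
    · rw [if_neg hs, pvStrainB_neg bid hs]
      exact ih ..

-- A's first_call[0] entry is the initial entry if present, else B's side-0 pass-2 scan
set_option maxHeartbeats 1000000 in
theorem pvLoopA_dict0 (seq : List String) (ls : Char) (lp : Int)
    (fc0 fc1 : PySem.Dict Char Int) (p : Int) (c : Char) :
    ((pvLoopA seq ls lp fc0 fc1 p).2.2.1).get? c = (fc0.get? c).or (pvPass2 seq p 0 c) := by
  induction seq generalizing ls lp fc0 fc1 p with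
  | nil => cases h : fc0.get? c <;> simp [pvLoopA, pvPass2, h]
  | cons bid rest ih =>
    rw [pvLoopA_cons, pvPass2_cons]
    by_cases hs : pvStrainCh (pvStrip bid) ∈ ['C', 'D', 'H', 'S', 'N']
    · rw [if_pos hs, pvStrainB_pos bid hs]
      by_cases hm : PySem.Int.mod p 2 = 0
      · rw [if_pos hm]
        by_cases hc : pvStrainCh (pvStrip bid) = c
        · have hcond : PySem.Int.mod p 2 = 0 ∧
              (some (pvStrainCh (pvStrip bid)) : Option Char) = some c := ⟨hm, by rw [hc]⟩
          rw [if_pos hcond]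
          cases h : fc0.get? c with
          | some v =>
            have hcont : fc0.contains (pvStrainCh (pvStrip bid)) = true := by
              rw [hc, PySem.Dict.contains_eq_isSome_get?, h]; rfl
            rw [if_pos hcont, ih, h]; rfl
          | none =>
            have hcont : ¬ fc0.contains (pvStrainCh (pvStrip bid)) = true := by
              rw [hc, PySem.Dict.contains_eq_isSome_get?, h]; exact Bool.false_ne_true
            rw [if_neg hcont, ih, hc, PySem.Dict.get?_insert_self]; rfl
        · have hcond : ¬ (PySem.Int.mod p 2 = 0 ∧
              (some (pvStrainCh (pvStrip bid)) : Option Char) = some c) :=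
            fun hh => hc (Option.some.inj hh.2)
          rw [if_neg hcond]
          by_cases hcont : fc0.contains (pvStrainCh (pvStrip bid)) = true
          · rw [if_pos hcont]; exact ih ..
          · rw [if_neg hcont, ih, PySem.Dict.get?_insert_of_ne]
            exact fun hh => hc hh.symm
      · have hcond : ¬ (PySem.Int.mod p 2 = 0 ∧
            (some (pvStrainCh (pvStrip bid)) : Option Char) = some c) := fun hh => hm hh.1
        rw [if_neg hm, if_neg hcond]
        exact ih ..
    · have hcond : ¬ (PySem.Int.mod p 2 = 0 ∧ pvStrainB bid = some c) := by
        rw [pvStrainB_neg bid hs]; rintro ⟨-, hh⟩; simp at hh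
      rw [if_neg hs, if_neg hcond]
      exact ih ..

-- A's first_call[1] entry is the initial entry if present, else B's side-1 pass-2 scan
set_option maxHeartbeats 1000000 in
theorem pvLoopA_dict1 (seq : List String) (ls : Char) (lp : Int)
    (fc0 fc1 : PySem.Dict Char Int) (p : Int) (c : Char) :
    ((pvLoopA seq ls lp fc0 fc1 p).2.2.2).get? c = (fc1.get? c).or (pvPass2 seq p 1 c) := by
  induction seq generalizing ls lp fc0 fc1 p with
  | nil => cases h : fc1.get? c <;> simp [pvLoopA, pvPass2, h]
  | cons bid rest ih =>
    rw [pvLoopA_cons, pvPass2_cons]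
    by_cases hs : pvStrainCh (pvStrip bid) ∈ ['C', 'D', 'H', 'S', 'N']
    · rw [if_pos hs, pvStrainB_pos bid hs]
      by_cases hm : PySem.Int.mod p 2 = 0
      · have hcond : ¬ (PySem.Int.mod p 2 = 1 ∧
            (some (pvStrainCh (pvStrip bid)) : Option Char) = some c) := by
          rw [hm]; exact fun hh => absurd hh.1 (by decide)
        rw [if_pos hm, if_neg hcond]
        exact ih ..
      · have hm1 : PySem.Int.mod p 2 = 1 := (PySem.Int.mod_two_eq p).resolve_left hm
        rw [if_neg hm]
        by_cases hc : pvStrainCh (pvStrip bid) = c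
        · have hcond : PySem.Int.mod p 2 = 1 ∧
              (some (pvStrainCh (pvStrip bid)) : Option Char) = some c := ⟨hm1, by rw [hc]⟩
          rw [if_pos hcond]
          cases h : fc1.get? c with
          | some v =>
            have hcont : fc1.contains (pvStrainCh (pvStrip bid)) = true := by
              rw [hc, PySem.Dict.contains_eq_isSome_get?, h]; rfl
            rw [if_pos hcont, ih, h]; rfl
          | none =>
            have hcont : ¬ fc1.contains (pvStrainCh (pvStrip bid)) = true := by
              rw [hc, PySem.Dict.contains_eq_isSome_get?, h]; exact Bool.false_ne_true
            rw [if_neg hcont, ih, hc, PySem.Dict.get?_insert_self]; rfl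
        · have hcond : ¬ (PySem.Int.mod p 2 = 1 ∧
              (some (pvStrainCh (pvStrip bid)) : Option Char) = some c) :=
            fun hh => hc (Option.some.inj hh.2)
          rw [if_neg hcond]
          by_cases hcont : fc1.contains (pvStrainCh (pvStrip bid)) = true
          · rw [if_pos hcont]; exact ih ..
          · rw [if_neg hcont, ih, PySem.Dict.get?_insert_of_ne]
            exact fun hh => hc hh.symm
    · have hcond : ¬ (PySem.Int.mod p 2 = 1 ∧ pvStrainB bid = some c) := by
        rw [pvStrainB_neg bid hs]; rintro ⟨-, hh⟩; simp at hh
      rw [if_neg hs, if_neg hcond]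
      exact ih ..

-- ===== VERDICT (by name: the statement is the Claim_ definition above) =====
set_option maxHeartbeats 1000000 in
theorem get_contract_declarer_spec : Claim_equal_get_contract_declarer := by
  intro dealer seq _ _
  unfold Spec_get_contract_declarer get_contract_declarer get_contract_declarer_alt
  have hlast := pvLoopA_last seq '-' (-1) PySem.Dict.empty PySem.Dict.empty dealer
  have h1 : (pvLoopA seq '-' (-1) PySem.Dict.empty PySem.Dict.empty dealer).1
      = (pvPass1 seq '-' (-1) dealer).1 := by rw [← hlast]
  have h2 : (pvLoopA seq '-' (-1) PySem.Dict.empty PySem.Dict.empty dealer).2.1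
      = (pvPass1 seq '-' (-1) dealer).2 := by rw [← hlast]
  by_cases hd : (pvPass1 seq '-' (-1) dealer).1 = '-'
  · rw [if_pos (by rw [h1]; exact hd), if_pos hd, h1, hd]
  · rw [if_neg (by rw [h1]; exact hd), if_neg hd, h1]
    rcases PySem.Int.mod_two_eq (pvLoopA seq '-' (-1) PySem.Dict.empty PySem.Dict.empty dealer).2.1
        with hm | hm
    · rw [if_pos hm, pvLoopA_dict0, PySem.Dict.get?_empty]
      rw [h2] at hm
      rw [hm]
      rfl
    · rw [if_neg (by rw [hm]; decide), pvLoopA_dict1, PySem.Dict.get?_empty]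
      rw [h2] at hm
      rw [hm]
      rfl
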